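-- pv_equiv track=rewrite | github.com/Salome2010/IntroProgramacion | repaso.py | ultima_aparicion
-- ===== SOURCE A (Python) =====
-- def ultima_aparicion(s:[int], e:int) -> int: # usando while
--     i:int=0
--     ultimo:int = 0
--     while (i<len(s)):
--         if e==s[len(s)-1-i]: #comienza desde atras ya
--             ultimo=i
--         i+=1
--     return ultimo
-- ===== SOURCE B (Python) =====
-- def ultima_aparicion(s, e):
--     n = len(s)
--     for j, x in enumerate(s):
--         if x == e:
--             return n - 1 - j
--     return 0
-- ===== Notes on version B (the rewrite author's own statement) =====
-- stated objective: simpler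
-- what changed: Replaces A's full back-to-front scan with an 'ultimo' accumulator by a single forward scan that returns len(s)-1-j at the first match (early exit), dropping the accumulator and the per-element index arithmetic.
import Mathlib
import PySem

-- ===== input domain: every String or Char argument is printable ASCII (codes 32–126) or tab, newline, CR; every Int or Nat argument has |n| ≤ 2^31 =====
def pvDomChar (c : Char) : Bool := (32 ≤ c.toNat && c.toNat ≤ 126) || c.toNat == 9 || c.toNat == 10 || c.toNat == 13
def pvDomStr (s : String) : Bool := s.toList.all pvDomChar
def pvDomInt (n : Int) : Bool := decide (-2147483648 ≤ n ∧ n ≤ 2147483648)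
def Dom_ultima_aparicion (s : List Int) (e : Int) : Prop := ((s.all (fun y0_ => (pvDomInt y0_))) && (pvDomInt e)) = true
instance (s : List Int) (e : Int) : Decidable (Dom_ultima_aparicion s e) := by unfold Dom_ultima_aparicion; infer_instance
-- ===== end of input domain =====

-- B replaces A's full back-to-front scan with an accumulator by a forward scan with early return; return value equivalence is proved for all inputs.

-- ===== PORT A =====
-- while loop over i in [0, len s): if e == s[len-1-i] then ultimo := i; the index is always in range, so pyGetD's default is never read.
def ultima_aparicion (s : List Int) (e : Int) : Int :=
  (List.range s.length).foldl
    (fun (ultimo : Int) (i : Nat) =>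
      if e = PySem.List.pyGetD s ((s.length : Int) - 1 - (i : Int)) 0 then (i : Int) else ultimo)
    0

-- ===== PORT B =====
-- forward scan carrying the current index j; return n - 1 - j at the first match, 0 if none.
def ultimaAltGo (e n j : Int) : List Int → Int
  | [] => 0
  | x :: rest => if x = e then n - 1 - j else ultimaAltGo e n (j + 1) rest

def ultima_aparicion_alt (s : List Int) (e : Int) : Int :=
  ultimaAltGo e (s.length : Int) 0 s

-- ===== PRECONDITION & SPEC =====
def Spec_ultima_aparicion (s : List Int) (e : Int) (out : Int) : Prop := out = ultima_aparicion_alt s e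
instance (s : List Int) (e : Int) (out : Int) : Decidable (Spec_ultima_aparicion s e out) := by unfold Spec_ultima_aparicion; infer_instance

-- ===== CLAIM (what is proved, stated in full; the proofs are below) =====
def Claim_equal_ultima_aparicion : Prop := ∀ (s : List Int) (e : Int), Dom_ultima_aparicion s e → Spec_ultima_aparicion s e (ultima_aparicion s e)

-- ===== LEMMAS AND PROOFS =====

-- A on a cons: the last loop step (i = n') inspects the head; the earlier steps coincide with A on the tail.
theorem ultima_aparicion_cons (x : Int) (s : List Int) (e : Int) :
    ultima_aparicion (x :: s) e = if e = x then (s.length : Int) else ultima_aparicion s e := by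
  unfold ultima_aparicion
  rw [show (x :: s).length = s.length + 1 from rfl, List.range_succ, List.foldl_append]
  have hcongr :
      (List.range s.length).foldl
        (fun (ultimo : Int) (i : Nat) =>
          if e = PySem.List.pyGetD (x :: s) (((s.length + 1 : Nat) : Int) - 1 - (i : Int)) 0 then (i : Int) else ultimo) 0 =
      (List.range s.length).foldl
        (fun (ultimo : Int) (i : Nat) =>
          if e = PySem.List.pyGetD s ((s.length : Int) - 1 - (i : Int)) 0 then (i : Int) else ultimo) 0 := by
    refine PySem.List.foldl_congr_mem _ _ _ _ (fun ultimo i hi => ?_)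
    have hi' : i < s.length := List.mem_range.mp hi
    have h1 : (((s.length + 1 : Nat) : Int) - 1 - (i : Int)) = ((s.length - i : Nat) : Int) := by
      omega
    have h2 : ((s.length : Int) - 1 - (i : Int)) = ((s.length - 1 - i : Nat) : Int) := by omega
    rw [h1, h2, PySem.List.pyGetD_natCast, PySem.List.pyGetD_natCast]
    have h3 : s.length - i = (s.length - 1 - i) + 1 := by omega
    rw [h3]
    rfl
  rw [hcongr]
  simp only [List.foldl_cons, List.foldl_nil]
  have h0 : (((s.length + 1 : Nat) : Int) - 1 - ((s.length : Nat) : Int)) = 0 := by push_cast; ring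
  rw [h0, PySem.List.pyGetD_zero_cons]

theorem ultimaAltGo_shift (e n j : Int) (l : List Int) :
    ultimaAltGo e (n + 1) (j + 1) l = ultimaAltGo e n j l := by
  induction l generalizing j with
  | nil => rfl
  | cons x rest ih =>
    simp only [ultimaAltGo]
    rw [show n + 1 - 1 - (j + 1) = n - 1 - j by ring, show j + 1 + 1 = (j + 1) + 1 from rfl, ih]

-- ===== VERDICT (by name: the statement is the Claim_ definition above) =====
theorem ultima_aparicion_eq_alt (s : List Int) (e : Int) :
    ultima_aparicion s e = ultima_aparicion_alt s e := by
  induction s with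
  | nil => rfl
  | cons x rest ih =>
    rw [ultima_aparicion_cons]
    unfold ultima_aparicion_alt
    simp only [ultimaAltGo, List.length_cons]
    push_cast
    rw [show ((rest.length : Int) + 1 - 1 - 0) = (rest.length : Int) by ring]
    by_cases hx : x = e
    · subst hx; simp
    · rw [if_neg hx, if_neg (fun h => hx h.symm)]
      have h := ultimaAltGo_shift e (rest.length : Int) 0 rest
      norm_num at h
      rw [h, ih]
      rfl

theorem ultima_aparicion_spec : Claim_equal_ultima_aparicion := by
  intro s e _
  exact ultima_aparicion_eq_alt s e
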